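-- pv_equiv track=rewrite | github.com/Chandra-mohn/nexflow | nexflow-toolchain/backend/generators/flow/state_context_generator.py | _format_context_imports
-- ===== SOURCE A (Python) =====
-- from typing import Set, List, Dict, Optional
--
-- def _format_context_imports(imports: Set[str]) -> str:
--     """Format imports with proper grouping."""
--     sorted_imports = sorted(imports)
--     java_imports = [i for i in sorted_imports if i.startswith('java.')]
--     flink_imports = [i for i in sorted_imports if i.startswith('org.apache.flink')]
--     other_imports = [i for i in sorted_imports if not i.startswith('java.') and not i.startswith('org.apache.flink')]
--
--     lines = []
--     if java_imports:
--         lines.extend(f'import {i};' for i in java_imports)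
--         lines.append('')
--     if flink_imports:
--         lines.extend(f'import {i};' for i in flink_imports)
--         lines.append('')
--     if other_imports:
--         lines.extend(f'import {i};' for i in other_imports)
--         lines.append('')
--
--     return '\n'.join(lines)
-- ===== SOURCE B (Python) =====
-- def _rank(i):
--     """Group rank: java < flink < everything else."""
--     if i.startswith('java.'):
--         return 0
--     if i.startswith('org.apache.flink'):
--         return 1
--     return 2
--
--
-- def _format_context_imports(imports):
--     """Format imports with proper grouping (one composite-key sort + group-break scan)."""
--     ordered = sorted(imports, key=lambda i: (_rank(i), i))
--     lines = []
--     for idx, cur in enumerate(ordered):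
--         lines.append('import %s;' % cur)
--         # close the current rank run with a blank line (also at the very end)
--         if idx + 1 == len(ordered) or _rank(ordered[idx + 1]) != _rank(cur):
--             lines.append('')
--     return '\n'.join(lines)
-- ===== Notes on version B (the rewrite author's own statement) =====
-- stated objective: alternative
-- what changed: B does one composite-key sort by (group-rank, name) and then a single recursive group-break scan that inserts a blank line whenever the rank changes, instead of A's three separate prefix-filter scans over sorted(imports) with three copy-pasted if-blocks.
import Mathlib
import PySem

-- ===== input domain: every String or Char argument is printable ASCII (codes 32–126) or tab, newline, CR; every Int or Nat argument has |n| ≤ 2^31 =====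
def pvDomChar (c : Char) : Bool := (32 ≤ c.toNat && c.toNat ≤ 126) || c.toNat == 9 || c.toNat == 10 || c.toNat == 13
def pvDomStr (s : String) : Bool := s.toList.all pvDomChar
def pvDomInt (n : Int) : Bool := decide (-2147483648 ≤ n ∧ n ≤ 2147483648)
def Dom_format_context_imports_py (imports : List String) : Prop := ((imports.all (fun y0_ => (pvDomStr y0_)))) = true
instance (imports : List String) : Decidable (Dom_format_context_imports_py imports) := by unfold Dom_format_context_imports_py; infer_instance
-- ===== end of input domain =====

-- B replaces A's three prefix-filter scans with one composite-key sort by (group rank, name)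
-- followed by a single recursive group-break scan (objective: alternative algorithm).

-- ===== PORT A =====
def format_context_imports_py (imports : List String) : String :=
  let sorted_imports := PySem.List.sorted imports (fun x => x) false
  let java_imports := sorted_imports.filter (fun i => PySem.Str.startswith i "java.")
  let flink_imports := sorted_imports.filter (fun i => PySem.Str.startswith i "org.apache.flink")
  let other_imports := sorted_imports.filter
    (fun i => !(PySem.Str.startswith i "java.") && !(PySem.Str.startswith i "org.apache.flink"))
  let lines : List String := []
  let lines := if java_imports.isEmpty then lines
    else lines ++ java_imports.map (fun i => "import " ++ i ++ ";") ++ [""]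
  let lines := if flink_imports.isEmpty then lines
    else lines ++ flink_imports.map (fun i => "import " ++ i ++ ";") ++ [""]
  let lines := if other_imports.isEmpty then lines
    else lines ++ other_imports.map (fun i => "import " ++ i ++ ";") ++ [""]
  PySem.Str.join "\n" lines

-- ===== PORT B =====
-- _rank from Source B
def fci_rank (i : String) : Int :=
  if PySem.Str.startswith i "java." then 0
  else if PySem.Str.startswith i "org.apache.flink" then 1
  else 2

-- _emit from Source B: emit 'import x;' lines, blank line whenever the rank run ends
def fci_emit : List String → List String
  | [] => []
  | [first] => ["import " ++ first ++ ";", ""]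
  | first :: j :: tl =>
    if fci_rank j ≠ fci_rank first then ("import " ++ first ++ ";") :: "" :: fci_emit (j :: tl)
    else ("import " ++ first ++ ";") :: fci_emit (j :: tl)

def format_context_imports_py_alt (imports : List String) : String :=
  let ordered := PySem.List.sorted2 imports (fun i => fci_rank i) (fun i => i) false
  PySem.Str.join "\n" (fci_emit ordered)

-- ===== PRECONDITION & SPEC =====
def Spec_format_context_imports_py (imports : List String) (out : String) : Prop := out = format_context_imports_py_alt imports
instance (imports : List String) (out : String) : Decidable (Spec_format_context_imports_py imports out) := by unfold Spec_format_context_imports_py; infer_instance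

-- ===== CLAIM (what is proved, stated in full; the proofs are below) =====
def Claim_equal_format_context_imports_py : Prop := ∀ (imports : List String), Dom_format_context_imports_py imports → Spec_format_context_imports_py imports (format_context_imports_py imports)

-- ===== LEMMAS AND PROOFS =====

-- a string starting with "java." cannot start with "org.apache.flink", and vice versa
lemma fci_excl (s : String) (h : PySem.Str.startswith s "java." = true) :
    PySem.Str.startswith s "org.apache.flink" = false := by
  by_contra hq
  simp only [Bool.not_eq_false] at hq
  rw [PySem.Str.startswith_eq, PySem.Chars.startswith_iff] at h hq
  obtain ⟨t1, h1⟩ := h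
  obtain ⟨t2, h2⟩ := hq
  rw [← h2] at h1
  simp at h1

lemma fci_excl' (s : String) (h : PySem.Str.startswith s "org.apache.flink" = true) :
    PySem.Str.startswith s "java." = false := by
  by_contra hq
  simp only [Bool.not_eq_false] at hq
  have hf := fci_excl s hq
  rw [hf] at h
  exact Bool.false_ne_true h

lemma fci_rank_J {i : String} (h : PySem.Str.startswith i "java." = true) : fci_rank i = 0 := by
  unfold fci_rank; rw [h]; rfl

lemma fci_rank_F {i : String} (h : PySem.Str.startswith i "org.apache.flink" = true) :
    fci_rank i = 1 := by
  unfold fci_rank; rw [fci_excl' i h, h]; rfl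

lemma fci_rank_O {i : String} (h1 : PySem.Str.startswith i "java." = false)
    (h2 : PySem.Str.startswith i "org.apache.flink" = false) : fci_rank i = 2 := by
  unfold fci_rank; rw [h1, h2]; rfl

-- sorted2 (tuple key) is sorted by the lexicographic key
lemma fci_sorted2_eq_sorted_toLex {α κ₁ κ₂ : Type} [LinearOrder κ₁] [LinearOrder κ₂]
    (xs : List α) (k1 : α → κ₁) (k2 : α → κ₂) :
    PySem.List.sorted2 xs k1 k2 false
      = PySem.List.sorted xs (fun x => toLex (k1 x, k2 x)) false := by
  unfold PySem.List.sorted2 PySem.List.sorted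
  have h : (fun a b => decide (k1 a < k1 b) || (!decide (k1 b < k1 a) && decide (k2 a < k2 b)))
      = (fun a b => decide ((toLex (k1 a, k2 a) : Lex (κ₁ × κ₂)) < toLex (k1 b, k2 b))) := by
    funext a b
    by_cases h1 : k1 a < k1 b
    · simp [h1, Prod.Lex.lt_iff, asymm h1]
    · by_cases h2 : k1 b < k1 a
      · have hne : k1 a ≠ k1 b := ne_of_gt h2
        simp [h1, h2, Prod.Lex.lt_iff, hne]
      · have he : k1 a = k1 b := le_antisymm (not_lt.1 h2) (not_lt.1 h1)
        simp [h1, h2, Prod.Lex.lt_iff, he]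
  simp only [Bool.false_eq_true, if_false, h]

-- the emitter over one constant-rank group followed by a differently-ranked tail
lemma fci_emit_group (r : Int) (g t : List String)
    (hg : ∀ x ∈ g, fci_rank x = r)
    (ht : ∀ y ∈ t.head?, fci_rank y ≠ r) :
    fci_emit (g ++ t)
      = (if g.isEmpty then [] else g.map (fun i => "import " ++ i ++ ";") ++ [""]) ++ fci_emit t := by
  induction g with
  | nil => simp
  | cons x g' ih =>
    have hx : fci_rank x = r := hg x (by simp)
    cases g' with
    | nil =>
      cases t with
      | nil => simp [fci_emit]
      | cons y t' =>
        have hy : fci_rank y ≠ fci_rank x := by rw [hx]; exact ht y (by simp)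
        simp [fci_emit, hy]
    | cons z g'' =>
      have hz : fci_rank z = fci_rank x := by rw [hx]; exact hg z (by simp)
      have ih' := ih (fun w hw => hg w (by simp [List.mem_cons] at hw ⊢; tauto))
      rw [List.cons_append,
        show fci_emit (x :: (z :: g'' ++ t)) = ("import " ++ x ++ ";") :: fci_emit (z :: g'' ++ t)
          from by simp [fci_emit, hz],
        show (z : String) :: g'' ++ t = (z :: g'') ++ t from rfl, ih']
      simp

-- the composite-key sort is exactly A's three filtered groups, concatenated
lemma fci_sorted2_eq_groups (imports : List String) :
    PySem.List.sorted2 imports (fun i => fci_rank i) (fun i => i) false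
      = (PySem.List.sorted imports (fun x => x) false).filter (fun i => PySem.Str.startswith i "java.")
        ++ (PySem.List.sorted imports (fun x => x) false).filter (fun i => PySem.Str.startswith i "org.apache.flink")
        ++ (PySem.List.sorted imports (fun x => x) false).filter
            (fun i => !(PySem.Str.startswith i "java.") && !(PySem.Str.startswith i "org.apache.flink")) := by
  set s := PySem.List.sorted imports (fun x => x) false with hs
  rw [fci_sorted2_eq_sorted_toLex]
  have hinj : Function.Injective (fun x : String => (toLex (fci_rank x, x) : Lex (Int × String))) := by
    intro a b h
    have := congrArg (fun z : Lex (Int × String) => (ofLex z).2) h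
    simpa using this
  have hFO : s.filter (fun i => PySem.Str.startswith i "org.apache.flink")
        ++ s.filter (fun i => !(PySem.Str.startswith i "java.") && !(PySem.Str.startswith i "org.apache.flink"))
      = (s.filter (fun i => !(PySem.Str.startswith i "java."))).filter
          (fun i => PySem.Str.startswith i "org.apache.flink")
        ++ (s.filter (fun i => !(PySem.Str.startswith i "java."))).filter
          (fun i => !(PySem.Str.startswith i "org.apache.flink")) := by
    rw [List.filter_filter, List.filter_filter]
    congr 1
    · apply List.filter_congr
      intro i _
      cases h : PySem.Str.startswith i "org.apache.flink"
      · simp only [Bool.false_and]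
      · simp only [fci_excl' i h, Bool.not_false, Bool.true_and]
    · apply List.filter_congr
      intro i _
      exact (Bool.and_comm _ _)
  have pa := List.filter_append_perm (fun i => PySem.Str.startswith i "org.apache.flink")
      (s.filter (fun i => !(PySem.Str.startswith i "java.")))
  have pb := List.filter_append_perm (fun i => PySem.Str.startswith i "java.") s
  have p3 : ((s.filter (fun i => PySem.Str.startswith i "java."))
      ++ (s.filter (fun i => PySem.Str.startswith i "org.apache.flink")
        ++ s.filter (fun i => !(PySem.Str.startswith i "java.") && !(PySem.Str.startswith i "org.apache.flink")))).Perm s := by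
    rw [hFO]
    exact (pa.append_left _).trans pb
  have hp : (PySem.List.sorted imports (fun x => toLex (fci_rank x, x)) false).Perm
      ((s.filter (fun i => PySem.Str.startswith i "java."))
      ++ s.filter (fun i => PySem.Str.startswith i "org.apache.flink")
      ++ s.filter (fun i => !(PySem.Str.startswith i "java.") && !(PySem.Str.startswith i "org.apache.flink"))) := by
    rw [List.append_assoc]
    exact (PySem.List.sorted_perm imports _ false).trans
      ((PySem.List.sorted_perm imports (fun x => x) false).symm.trans p3.symm)
  have h1 : List.Pairwise
      (fun a b => (toLex (fci_rank a, a) : Lex (Int × String)) ≤ toLex (fci_rank b, b))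
      (PySem.List.sorted imports (fun x => toLex (fci_rank x, x)) false) :=
    PySem.List.sorted_pairwise imports _
  have hsp : s.Pairwise (fun a b => a ≤ b) := PySem.List.sorted_pairwise imports _
  have step : ∀ (p : String → Bool) (r : Int), (∀ i, p i = true → fci_rank i = r) →
      (s.filter p).Pairwise (fun a b =>
        (toLex (fci_rank a, a) : Lex (Int × String)) ≤ toLex (fci_rank b, b)) := by
    intro p r hr
    refine List.Pairwise.imp_of_mem ?_ (hsp.filter p)
    intro a b ha hb hle
    have hra := hr a (List.mem_filter.1 ha).2
    have hrb := hr b (List.mem_filter.1 hb).2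
    rw [Prod.Lex.le_iff]
    exact Or.inr ⟨by simp [hra, hrb], hle⟩
  have hrankO : ∀ i : String,
      (!(PySem.Str.startswith i "java.") && !(PySem.Str.startswith i "org.apache.flink")) = true →
      fci_rank i = 2 := by
    intro i h
    simp only [Bool.and_eq_true, Bool.not_eq_true'] at h
    exact fci_rank_O h.1 h.2
  have h2 : List.Pairwise
      (fun a b => (toLex (fci_rank a, a) : Lex (Int × String)) ≤ toLex (fci_rank b, b))
      ((s.filter (fun i => PySem.Str.startswith i "java."))
      ++ s.filter (fun i => PySem.Str.startswith i "org.apache.flink")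
      ++ s.filter (fun i => !(PySem.Str.startswith i "java.") && !(PySem.Str.startswith i "org.apache.flink"))) := by
    rw [List.append_assoc, List.pairwise_append, List.pairwise_append]
    refine ⟨step _ 0 (fun i h => fci_rank_J h),
      ⟨step _ 1 (fun i h => fci_rank_F h), step _ 2 hrankO, ?_⟩, ?_⟩
    · intro a ha b hb
      have hra : fci_rank a = 1 := fci_rank_F (List.mem_filter.1 ha).2
      have hrb : fci_rank b = 2 := hrankO b (List.mem_filter.1 hb).2
      exact le_of_lt (Prod.Lex.lt_iff.2 (Or.inl (by rw [hra, hrb]; norm_num)))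
    · intro a ha b hb
      have hra : fci_rank a = 0 := fci_rank_J (List.mem_filter.1 ha).2
      have hrb : fci_rank b = 1 ∨ fci_rank b = 2 := by
        rcases List.mem_append.1 hb with hb | hb
        · exact Or.inl (fci_rank_F (List.mem_filter.1 hb).2)
        · exact Or.inr (hrankO b (List.mem_filter.1 hb).2)
      refine le_of_lt (Prod.Lex.lt_iff.2 (Or.inl ?_))
      rcases hrb with h | h <;> rw [hra, h] <;> norm_num
  exact PySem.List.eq_of_perm_of_pairwise_le_of_injective _ hinj hp h1 h2

-- the emitter over three constant-rank groups is A's three if-blocks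
lemma fci_emit_three (J F O : List String)
    (hrJ : ∀ x ∈ J, fci_rank x = 0) (hrF : ∀ x ∈ F, fci_rank x = 1)
    (hrO : ∀ x ∈ O, fci_rank x = 2) :
    fci_emit (J ++ F ++ O)
      = (if J.isEmpty then [] else J.map (fun i => "import " ++ i ++ ";") ++ [""])
        ++ ((if F.isEmpty then [] else F.map (fun i => "import " ++ i ++ ";") ++ [""])
          ++ (if O.isEmpty then [] else O.map (fun i => "import " ++ i ++ ";") ++ [""])) := by
  have h3 : fci_emit O = (if O.isEmpty then [] else O.map (fun i => "import " ++ i ++ ";") ++ [""]) := by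
    have h := fci_emit_group 2 O [] hrO (by intro y hy; simp at hy)
    simpa [fci_emit] using h
  rw [List.append_assoc]
  rw [fci_emit_group 0 J (F ++ O) hrJ (by
    intro y hy
    rcases List.mem_append.1 (List.mem_of_mem_head? hy) with h | h
    · rw [hrF y h]; norm_num
    · rw [hrO y h]; norm_num)]
  rw [fci_emit_group 1 F O hrF (by
    intro y hy
    rw [hrO y (List.mem_of_mem_head? hy)]; norm_num)]
  rw [h3]

-- ===== VERDICT (by name: the statement is the Claim_ definition above) =====
theorem format_context_imports_py_spec : Claim_equal_format_context_imports_py := by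
  intro imports _
  show format_context_imports_py imports = format_context_imports_py_alt imports
  simp only [format_context_imports_py, format_context_imports_py_alt, fci_sorted2_eq_groups]
  rw [fci_emit_three _ _ _
    (fun x hx => fci_rank_J (List.mem_filter.1 hx).2)
    (fun x hx => fci_rank_F (List.mem_filter.1 hx).2)
    (fun x hx => by
      have h := (List.mem_filter.1 hx).2
      simp only [Bool.and_eq_true, Bool.not_eq_true'] at h
      exact fci_rank_O h.1 h.2)]
  split_ifs <;> simp
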